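-- pv_equiv track=rewrite | github.com/Janus022012/netdev-configconv | src/domain/rule/rule.py | _apply_filling_each_commands
-- ===== SOURCE A (Python) =====
-- from typing import List, Literal, Dict, Union
--
-- def _apply_filling_each_commands(filling: str, commands_group: List[List[str]]) -> List[List[str]]:
--     result: List[List[str]] = []
--
--     for commands in commands_group:
--         commands_result = []
--         for i, command in enumerate(commands):
--             commands_result.append(command)
--             if len(commands) != (i+1):
--                 commands_result.append(filling)
--         result.append(commands_result)
--
--     return result
-- ===== SOURCE B (Python) =====
-- def _apply_filling_each_commands(filling, commands_group):
--     # Divide and conquer: interleaving cmds[lo:hi] = interleave left half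
--     # + [filling] + interleave right half; O(log n) recursion depth.
--     def ins(cmds, lo, hi):
--         if hi - lo == 0:
--             return []
--         if hi - lo == 1:
--             return [cmds[lo]]
--         mid = (lo + hi) // 2
--         return ins(cmds, lo, mid) + [filling] + ins(cmds, mid, hi)
--     return [ins(cmds, 0, len(cmds)) for cmds in commands_group]
-- ===== Notes on version B (the rewrite author's own statement) =====
-- stated objective: alternative
-- what changed: Replaces A's linear indexed scan with a conditional separator branch by a divide-and-conquer join: each group is split in halves, each half interleaved recursively, and one filling placed between the halves.
import Mathlib
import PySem

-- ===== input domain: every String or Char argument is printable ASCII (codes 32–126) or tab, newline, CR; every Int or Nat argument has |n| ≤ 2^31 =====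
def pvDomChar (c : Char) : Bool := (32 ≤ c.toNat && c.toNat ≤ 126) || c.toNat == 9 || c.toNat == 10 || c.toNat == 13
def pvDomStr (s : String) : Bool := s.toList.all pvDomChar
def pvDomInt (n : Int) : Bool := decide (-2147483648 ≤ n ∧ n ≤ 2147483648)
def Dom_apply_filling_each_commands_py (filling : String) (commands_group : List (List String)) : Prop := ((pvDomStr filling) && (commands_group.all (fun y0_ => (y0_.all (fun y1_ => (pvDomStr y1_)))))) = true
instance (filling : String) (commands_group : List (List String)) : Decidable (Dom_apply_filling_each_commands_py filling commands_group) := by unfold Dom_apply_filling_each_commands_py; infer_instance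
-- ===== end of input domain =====

-- B replaces A's linear indexed scan with its conditional separator branch by a
-- divide-and-conquer join (interleave each half, one filling in the middle): alternative algorithm.

-- ===== PORT A =====
-- literal transliteration of A: outer append loop, inner enumerate loop with the
-- 'if len(commands) != (i+1)' branch
def apply_filling_each_commands_py (filling : String) (commands_group : List (List String)) : List (List String) :=
  commands_group.foldl (fun result commands =>
    result ++ [ (PySem.List.enumerate commands).foldl
      (fun commands_result p =>
        (commands_result ++ [p.2]) ++
          (if (commands.length : Int) ≠ p.1 + 1 then [filling] else [])) [] ]) []

-- ===== PORT B =====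
-- Source B's ins(cmds, lo, hi): divide and conquer on the index range; cmds[lo] is in
-- range whenever called with 0 ≤ lo < hi ≤ len(cmds), so getD is exact there.
def pvIns (filling : String) (cmds : List String) (lo hi : Nat) : List String :=
  if hi - lo = 0 then []
  else if hi - lo = 1 then [cmds.getD lo ""]
  else pvIns filling cmds lo ((lo + hi) / 2) ++ [filling] ++ pvIns filling cmds ((lo + hi) / 2) hi
termination_by hi - lo
decreasing_by all_goals omega

def apply_filling_each_commands_py_alt (filling : String) (commands_group : List (List String)) : List (List String) :=
  commands_group.map (fun cmds => pvIns filling cmds 0 cmds.length)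

-- ===== PRECONDITION & SPEC =====
def Spec_apply_filling_each_commands_py (filling : String) (commands_group : List (List String)) (out : List (List String)) : Prop := out = apply_filling_each_commands_py_alt filling commands_group
instance (filling : String) (commands_group : List (List String)) (out : List (List String)) : Decidable (Spec_apply_filling_each_commands_py filling commands_group out) := by unfold Spec_apply_filling_each_commands_py; infer_instance

-- ===== CLAIM (what is proved, stated in full; the proofs are below) =====
def Claim_equal_apply_filling_each_commands_py : Prop := ∀ (filling : String) (commands_group : List (List String)), Dom_apply_filling_each_commands_py filling commands_group → Spec_apply_filling_each_commands_py filling commands_group (apply_filling_each_commands_py filling commands_group)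

-- ===== LEMMAS AND PROOFS =====

-- proof-side reference interleaving (linear)
def pvSep (filling : String) : List String → List String
  | [] => []
  | [c] => [c]
  | c :: c' :: cs => c :: filling :: pvSep filling (c' :: cs)

theorem pvSep_append (filling : String) (xs ys : List String) (hx : xs ≠ []) (hy : ys ≠ []) :
    pvSep filling (xs ++ ys) = pvSep filling xs ++ filling :: pvSep filling ys := by
  induction xs with
  | nil => simp at hx
  | cons a l ih =>
    cases l with
    | nil => cases ys with
      | nil => simp at hy
      | cons b m => simp [pvSep]
    | cons a' l' =>
      have ihs := ih (by simp)
      simp only [List.cons_append] at ihs ⊢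
      simp only [pvSep]
      rw [ihs]
      simp

-- pvIns on [lo, lo+n) equals pvSep of that slice
theorem pvIns_eq (filling : String) (cmds : List String) :
    ∀ n lo, lo + n ≤ cmds.length →
      pvIns filling cmds lo (lo + n) = pvSep filling ((cmds.drop lo).take n) := by
  intro n
  induction n using Nat.strong_induction_on with
  | _ n ih =>
    intro lo hlen
    match n with
    | 0 => rw [pvIns]; simp [pvSep]
    | 1 =>
      rw [pvIns]
      have hlo : lo < cmds.length := by omega
      have hd : (cmds.drop lo).take 1 = [cmds[lo]] := by
        have hcons : cmds.drop lo = cmds[lo] :: cmds.drop (lo + 1) :=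
          List.drop_eq_getElem_cons hlo
        rw [hcons, List.take_succ_cons, List.take_zero]
      simp [hd, pvSep, List.getD, List.getElem?_eq_getElem hlo]
    | (m + 2) =>
      have h2 : (lo + (m + 2)) - lo = m + 2 := by omega
      rw [pvIns]
      have hne0 : ¬ ((lo + (m + 2)) - lo = 0) := by omega
      have hne1 : ¬ ((lo + (m + 2)) - lo = 1) := by omega
      rw [if_neg hne0, if_neg hne1]
      have hmid : (lo + (lo + (m + 2))) / 2 = lo + (m + 2) / 2 := by omega
      rw [hmid]
      set k := (m + 2) / 2 with hk
      have hk1 : 1 ≤ k := by omega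
      have hk2 : k < m + 2 := by omega
      have hleft := ih k (by omega) lo (by omega)
      have hright := ih (m + 2 - k) (by omega) (lo + k) (by omega)
      rw [show lo + (m + 2) = (lo + k) + (m + 2 - k) by omega] at *
      rw [hleft, hright]
      have hsplit : (cmds.drop lo).take (m + 2) =
          (cmds.drop lo).take k ++ ((cmds.drop (lo + k)).take (m + 2 - k)) := by
        rw [show m + 2 = k + (m + 2 - k) by omega, List.take_add, List.drop_drop]
        congr 2
        omega
      have h1 : (cmds.drop lo).take k ≠ [] := by
        apply List.ne_nil_of_length_pos
        simp only [List.length_take, List.length_drop]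
        omega
      have h2 : (cmds.drop (lo + k)).take (m + 2 - k) ≠ [] := by
        apply List.ne_nil_of_length_pos
        simp only [List.length_take, List.length_drop]
        omega
      rw [hsplit, pvSep_append filling _ _ h1 h2]
      simp

-- A's inner loop over a suffix (enumerated from s, total length L = s + |cmds|)
-- equals pvSep of that suffix.
theorem pv_inner_eq (filling : String) (cmds : List String) (s : Int) (L : Nat)
    (hL : (L : Int) = s + cmds.length) :
    (PySem.List.enumerate cmds s).flatMap
      (fun p => p.2 :: (if (L : Int) ≠ p.1 + 1 then [filling] else []))
    = pvSep filling cmds := by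
  induction cmds generalizing s with
  | nil => simp [PySem.List.enumerate_nil, pvSep]
  | cons c cs ih =>
    rw [PySem.List.enumerate_cons]
    cases cs with
    | nil =>
      have h : ¬ ((L : Int) ≠ s + 1) := by simp at hL; omega
      simp [h, pvSep]
    | cons c' cs' =>
      have h : (L : Int) ≠ s + 1 := by simp at hL ⊢; omega
      have hrest := ih (s + 1) (by simp at hL ⊢; omega)
      simp only [List.flatMap_cons, hrest, if_pos h, pvSep]
      simp

-- ===== VERDICT (by name: the statement is the Claim_ definition above) =====
theorem apply_filling_each_commands_py_spec : Claim_equal_apply_filling_each_commands_py := by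
  intro filling commands_group _
  unfold Spec_apply_filling_each_commands_py apply_filling_each_commands_py apply_filling_each_commands_py_alt
  simp only [List.append_assoc, List.singleton_append]
  rw [PySem.List.foldl_append_singleton_eq_map]
  simp only [List.nil_append]
  apply List.map_congr_left
  intro cmds _
  rw [PySem.List.foldl_append_eq_flatMap]
  have hA := pv_inner_eq filling cmds 0 cmds.length (by simp)
  have hB := pvIns_eq filling cmds cmds.length 0 (by omega)
  simp only [Nat.zero_add, List.drop_zero, List.take_length] at hB
  rw [hB]
  simpa using hA
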